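-- pv_equiv track=rewrite | github.com/merab235/algorithms-and-data-structures | lab1/task2/src/task2.py | ins_sort_2
-- ===== SOURCE A (Python) =====
-- def ins_sort_2(arr):
--     ind_arr = [-1] * len(arr)
--     ind_arr[0] = 1
--     for j in range(1, len(arr)):
--         i = j - 1
--         k = arr[j]
--         while arr[i] > k and i >= 0:
--             arr[i + 1] = arr[i]
--             i = i - 1
--         arr[i + 1] = k
--         ind_arr[j] = i + 2
--     return ind_arr, arr
-- ===== SOURCE B (Python) =====
-- def ins_sort_2(arr):
--     ind_arr = [1 + sum(x <= k for x in arr[:j]) for j, k in enumerate(arr)]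
--     arr.sort()
--     return ind_arr, arr
-- ===== Notes on version B (the rewrite author's own statement) =====
-- stated objective: simpler
-- what changed: A insertion-sorts in place with nested index-shifting loops while recording each insertion position; B computes every position directly as 1 + (number of earlier elements <= current) with a counting comprehension and gets the sorted array from the standard library sort, with no shifting loop at all.
import Mathlib
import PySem

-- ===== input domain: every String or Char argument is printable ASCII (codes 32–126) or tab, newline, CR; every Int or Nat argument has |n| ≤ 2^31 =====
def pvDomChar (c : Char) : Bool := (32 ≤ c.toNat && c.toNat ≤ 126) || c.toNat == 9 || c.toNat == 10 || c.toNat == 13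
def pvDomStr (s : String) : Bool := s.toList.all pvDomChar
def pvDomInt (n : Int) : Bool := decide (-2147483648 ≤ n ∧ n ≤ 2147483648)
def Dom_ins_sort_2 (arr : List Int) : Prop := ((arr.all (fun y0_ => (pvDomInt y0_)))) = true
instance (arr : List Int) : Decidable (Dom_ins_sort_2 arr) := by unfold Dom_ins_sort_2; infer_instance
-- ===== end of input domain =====

-- B replaces A's in-place shifting loops by a counting comprehension plus a library sort (objective:
-- simpler; same O(n^2) cost). Both A and B sort the argument list in place; the theorems are about the
-- return value.

-- ===== PORT A =====
-- the inner `while arr[i] > k and i >= 0` loop: state (arr, i), returned at exit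
def wshift (k : Int) (arr : List Int) (i : Int) : List Int × Int :=
  match PySem.List.pyGet? arr i with
  | some v =>
    if h : v > k ∧ i ≥ 0 then
      wshift k (arr.set (i + 1).toNat v) (i - 1)
    else (arr, i)
  | none => (arr, i)   -- IndexError (empty arr only); excluded by Pre_
  termination_by (i + 1).toNat
  decreasing_by omega

-- body of `for j in range(1, len(arr))`, state (ind_arr, arr)
def insStep (st : List Int × List Int) (j : Int) : List Int × List Int :=
  match PySem.List.pyGet? st.2 j with
  | some k =>
    let r := wshift k st.2 (j - 1)
    (st.1.set j.toNat (r.2 + 2), r.1.set (r.2 + 1).toNat k)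
  | none => st   -- unreachable for j in range(1, len(arr))

def ins_sort_2 (arr : List Int) : List Int × List Int :=
  let ind0 := (List.replicate arr.length (-1 : Int)).set 0 1
  (PySem.List.pyRange 1 (arr.length : Int)).foldl insStep (ind0, arr)

-- ===== PORT B =====
def ins_sort_2_alt (arr : List Int) : List Int × List Int :=
  ((PySem.List.enumerate arr).map (fun p =>
      (1 : Int) + ((PySem.List.slice arr none (some p.1)).countP (fun x => decide (x ≤ p.2)) : Nat)),
   PySem.List.sorted arr (fun y => y))

-- ===== PRECONDITION & SPEC =====
-- Pre_ excludes only the empty list, on which A raises IndexError at `ind_arr[0] = 1`.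
def Pre_ins_sort_2 (arr : List Int) : Prop := arr ≠ []
instance (arr : List Int) : Decidable (Pre_ins_sort_2 arr) := by unfold Pre_ins_sort_2; infer_instance
def pvWitness_ins_sort_2 : List Int := [3, 1, 2]

def Spec_ins_sort_2 (arr : List Int) (out : List Int × List Int) : Prop := out = ins_sort_2_alt arr
instance (arr : List Int) (out : List Int × List Int) : Decidable (Spec_ins_sort_2 arr out) := by unfold Spec_ins_sort_2; infer_instance

-- ===== CLAIM (what is proved, stated in full; the proofs are below) =====
def Claim_equal_ins_sort_2 : Prop := ∀ (arr : List Int), Dom_ins_sort_2 arr → Pre_ins_sort_2 arr → Spec_ins_sort_2 arr (ins_sort_2 arr)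

-- ===== LEMMAS AND PROOFS =====

-- manual equation lemma for the while loop (the dite under the Option match)
theorem wshift_get_some {arr : List Int} {i k v : Int} (h : PySem.List.pyGet? arr i = some v) :
    wshift k arr i
      = if _ : v > k ∧ i ≥ 0 then wshift k (arr.set (i + 1).toNat v) (i - 1) else (arr, i) := by
  rw [wshift, h]

-- manual equation lemma for the body of the outer for loop
theorem insStep_eq {ind arr2 : List Int} {j k : Int} (h : PySem.List.pyGet? arr2 j = some k) :
    insStep (ind, arr2) j
      = (ind.set j.toNat ((wshift k arr2 (j - 1)).2 + 2),
         (wshift k arr2 (j - 1)).1.set ((wshift k arr2 (j - 1)).2 + 1).toNat k) := by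
  unfold insStep
  rw [h]

-- A's while-loop on a (≤)-sorted block u: it stops at the first element ≤ k from the right, and the
-- subsequent write `arr[i+1] = k` produces exactly "insert k after the ≤-k prefix of u".
theorem wshift_spec (k : Int) (u : List Int) : ∀ (c : Int) (s : List Int),
    u.Pairwise (· ≤ ·) →
    (wshift k (u ++ c :: s) ((u.length : Int) - 1)).2
        = ((u.takeWhile (fun x => decide (x ≤ k))).length : Int) - 1
    ∧ (wshift k (u ++ c :: s) ((u.length : Int) - 1)).1.set
          (((wshift k (u ++ c :: s) ((u.length : Int) - 1)).2 + 1)).toNat k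
        = u.takeWhile (fun x => decide (x ≤ k)) ++ k :: (u.dropWhile (fun x => decide (x ≤ k)) ++ s) := by
  induction u using List.reverseRecOn with
  | nil =>
    intro c s _
    simp only [List.nil_append, List.length_nil, Nat.cast_zero, zero_sub]
    rw [wshift, PySem.List.pyGet?_neg_one]
    cases (c :: s).getLast? <;> simp
  | append_singleton u' a ih =>
    intro c s hp
    rw [List.pairwise_append] at hp
    obtain ⟨hp', -, hall⟩ := hp
    have hget : PySem.List.pyGet? ((u' ++ [a]) ++ c :: s) (((u' ++ [a]).length : Int) - 1)
        = some a := by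
      have he : ((u' ++ [a]).length : Int) - 1 = ((u'.length : Nat) : Int) := by
        simp only [List.length_append, List.length_cons, List.length_nil]
        push_cast
        ring
      rw [he, PySem.List.pyGet?_natCast, List.append_assoc,
        List.getElem?_append_right (by simp)]
      simp
    by_cases hak : a ≤ k
    · -- the loop does not fire: a ≤ k
      have hallk : ∀ x ∈ u' ++ [a], (fun x => decide (x ≤ k)) x = true := by
        intro x hx
        rcases List.mem_append.1 hx with hx | hx
        · exact decide_eq_true (le_trans (hall x hx a (by simp)) hak)
        · simp only [List.mem_singleton] at hx; subst hx; exact decide_eq_true hak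
      have htw : (u' ++ [a]).takeWhile (fun x => decide (x ≤ k)) = u' ++ [a] :=
        List.takeWhile_eq_self_iff.2 hallk
      have hdw : (u' ++ [a]).dropWhile (fun x => decide (x ≤ k)) = [] :=
        List.dropWhile_eq_nil_iff.2 (fun x hx => hallk x hx)
      have hstop : wshift k ((u' ++ [a]) ++ c :: s) (((u' ++ [a]).length : Int) - 1)
          = ((u' ++ [a]) ++ c :: s, ((u' ++ [a]).length : Int) - 1) := by
        rw [wshift_get_some hget, dif_neg]
        rintro ⟨h1, -⟩
        exact absurd hak (not_le.2 h1)
      rw [hstop, htw, hdw]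
      refine ⟨rfl, ?_⟩
      have hn : ((((u' ++ [a]).length : Int) - 1) + 1).toNat = (u' ++ [a]).length := by simp
      rw [hn, List.set_append, if_neg (lt_irrefl _), Nat.sub_self]
      simp
    · -- the loop fires: a > k, shift a one place right and recurse on u'
      have hstep : wshift k ((u' ++ [a]) ++ c :: s) (((u' ++ [a]).length : Int) - 1)
          = wshift k (u' ++ a :: (a :: s)) ((u'.length : Int) - 1) := by
        rw [wshift_get_some hget, dif_pos ⟨not_le.1 hak, by simp⟩]
        have hn : ((((u' ++ [a]).length : Int) - 1) + 1).toNat = (u' ++ [a]).length := by simp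
        have hset : ((u' ++ [a]) ++ c :: s).set ((((u' ++ [a]).length : Int) - 1) + 1).toNat a
            = u' ++ a :: (a :: s) := by
          rw [hn, List.set_append, if_neg (lt_irrefl _), Nat.sub_self]
          simp
        rw [hset]
        congr 1
        simp only [List.length_append, List.length_cons, List.length_nil]
        push_cast
        ring
      have hih := ih a (a :: s) hp'
      have htw : (u' ++ [a]).takeWhile (fun x => decide (x ≤ k))
          = u'.takeWhile (fun x => decide (x ≤ k)) := by
        rw [List.takeWhile_append]
        split_ifs with h
        · rw [(List.takeWhile_prefix _).eq_of_length h]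
          simp [hak]
        · rfl
      have hdw : (u' ++ [a]).dropWhile (fun x => decide (x ≤ k))
          = u'.dropWhile (fun x => decide (x ≤ k)) ++ [a] := by
        rw [List.dropWhile_append]
        split_ifs with h
        · rw [List.isEmpty_iff] at h
          rw [h]
          simp [hak]
        · rfl
      rw [hstep, htw, hdw]
      exact ⟨hih.1, by rw [hih.2]; simp⟩

-- on a sorted list, the length of the ≤-k prefix is the number of elements ≤ k
theorem takeWhile_len_countP (k : Int) : ∀ (u : List Int), u.Pairwise (· ≤ ·) →
    (u.takeWhile (fun x => decide (x ≤ k))).length = u.countP (fun x => decide (x ≤ k)) := by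
  intro u
  induction u with
  | nil => intro _; rfl
  | cons y t ih =>
    intro hp
    rw [List.pairwise_cons] at hp
    by_cases hy : y ≤ k
    · simp [hy, ih hp.2]
    · have ht : t.countP (fun x => decide (x ≤ k)) = 0 := by
        rw [List.countP_eq_zero]
        intro x hx
        simp only [decide_eq_true_eq]
        exact fun hc => hy (le_trans (hp.1 x hx) hc)
      simp [hy, ht]

theorem insertBy_eq_split (k : Int) (u : List Int) :
    PySem.List.insertBy (fun a b => decide (a < b)) k u
      = u.takeWhile (fun x => decide (x ≤ k)) ++ k :: u.dropWhile (fun x => decide (x ≤ k)) := by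
  induction u with
  | nil => rfl
  | cons y t ih =>
    by_cases h : k < y
    · simp [PySem.List.insertBy, h, not_le.2 h]
    · simp [PySem.List.insertBy, h, not_lt.1 h, ih]

theorem sorted_concat (l : List Int) (x : Int) :
    PySem.List.sorted (l ++ [x]) (fun y => y)
      = PySem.List.insertBy (fun a b => decide (a < b)) x (PySem.List.sorted l (fun y => y)) := by
  rw [PySem.List.sorted_eq_foldl_insertBy, PySem.List.sorted_eq_foldl_insertBy, List.foldl_append]
  rfl

-- the m-th entry of B's index list
theorem indB_getElem? (arr : List Int) (m : Nat) (hm : m < arr.length) :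
    ((PySem.List.enumerate arr).map (fun p =>
        (1 : Int) + ((PySem.List.slice arr none (some p.1)).countP (fun x => decide (x ≤ p.2)) : Nat)))[m]?
      = some ((1 : Int) + ((arr.take m).countP (fun x => decide (x ≤ arr[m])) : Nat)) := by
  have hlm : m < ((PySem.List.enumerate arr).map (fun p =>
      (1 : Int) + ((PySem.List.slice arr none (some p.1)).countP (fun x => decide (x ≤ p.2)) : Nat))).length := by
    simp [PySem.List.length_enumerate]
    omega
  rw [List.getElem?_eq_getElem hlm, List.getElem_map,
    PySem.List.getElem_enumerate arr 0 m (by simp [PySem.List.length_enumerate]; omega)]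
  simp only [zero_add]
  rw [PySem.List.slice_to arr (by positivity)]
  simp

-- outer-loop invariant: after the iterations j = 1 .. m-1 the state consists of B's first m index
-- entries (padded with -1) and the sorted m-prefix followed by the untouched tail
theorem outer_inv (arr : List Int) : ∀ (m : Nat), 1 ≤ m → m ≤ arr.length →
    (PySem.List.pyRange 1 (m : Int)).foldl insStep
        ((List.replicate arr.length (-1 : Int)).set 0 1, arr)
      = (((PySem.List.enumerate arr).map (fun p =>
            (1 : Int) + ((PySem.List.slice arr none (some p.1)).countP (fun x => decide (x ≤ p.2)) : Nat))).take m
            ++ List.replicate (arr.length - m) (-1 : Int),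
         PySem.List.sorted (arr.take m) (fun y => y) ++ arr.drop m) := by
  intro m hm
  induction m, hm using Nat.le_induction with
  | base =>
    intro h1
    rw [PySem.List.pyRange_one_eq_nil (by norm_num)]
    rcases arr with - | ⟨a, t⟩
    · simp at h1
    · simp only [List.foldl_nil, Prod.mk.injEq]
      constructor
      · simp [PySem.List.enumerate_cons, List.replicate_succ,
          PySem.List.slice_to (a :: t) (b := (0 : Int)) (by norm_num)]
      · simp [PySem.List.sorted_eq_foldl_insertBy, PySem.List.insertBy]
  | succ m hm ih =>
    intro hlt
    have hmlt : m < arr.length := by omega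
    have hih := ih (by omega)
    rw [show (((m + 1 : Nat) : Int)) = (m : Int) + 1 by push_cast; ring,
      PySem.List.pyRange_one_succ_right (by exact_mod_cast hm), List.foldl_append,
      List.foldl_cons, List.foldl_nil, hih]
    set B := (PySem.List.enumerate arr).map (fun p =>
        (1 : Int) + ((PySem.List.slice arr none (some p.1)).countP (fun x => decide (x ≤ p.2)) : Nat)) with hB
    set S := PySem.List.sorted (arr.take m) (fun y : Int => y) with hS
    have hPS : S.Pairwise (· ≤ ·) := PySem.List.sorted_pairwise (arr.take m) (fun y => y)
    have hlenS : S.length = m := by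
      rw [hS, (PySem.List.sorted_perm _ _ _).length_eq, List.length_take]
      omega
    have hdrop : arr.drop m = arr[m] :: arr.drop (m + 1) := List.drop_eq_getElem_cons hmlt
    have hget : PySem.List.pyGet? (S ++ arr.drop m) ((m : Nat) : Int) = some arr[m] := by
      rw [PySem.List.pyGet?_natCast, List.getElem?_append_right (by omega), hdrop]
      simp [hlenS]
    rw [insStep_eq hget]
    have harg : S ++ arr.drop m = S ++ arr[m] :: arr.drop (m + 1) := by rw [hdrop]
    have hidx : ((m : Nat) : Int) - 1 = (S.length : Int) - 1 := by rw [hlenS]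
    rw [harg, hidx]
    obtain ⟨hw2, hw1⟩ := wshift_spec arr[m] S arr[m] (arr.drop (m + 1)) hPS
    simp only [Prod.mk.injEq]
    constructor
    · -- the index list gains B's m-th entry
      rw [hw2]
      have hval : ((S.takeWhile (fun x => decide (x ≤ arr[m]))).length : Int) - 1 + 2
          = (1 : Int) + ((arr.take m).countP (fun x => decide (x ≤ arr[m])) : Nat) := by
        rw [takeWhile_len_countP _ _ hPS,
          List.Perm.countP_eq _ (PySem.List.sorted_perm (arr.take m) (fun y => y) false)]
        omega
      have hlB : (B.take m).length = m := by
        simp [hB, PySem.List.length_enumerate]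
        omega
      have hBm : B[m]? = some ((1 : Int) + ((arr.take m).countP (fun x => decide (x ≤ arr[m])) : Nat)) := by
        rw [hB]
        exact indB_getElem? arr m hmlt
      rw [hval, Int.toNat_natCast, List.set_append, if_neg (by rw [hlB]; exact lt_irrefl _), hlB,
        Nat.sub_self, show arr.length - m = (arr.length - (m + 1)) + 1 by omega,
        List.replicate_succ, List.set_cons_zero, List.take_add_one, hBm]
      simp
    · -- the array part becomes the sorted (m+1)-prefix
      rw [hw1, show arr.take (m + 1) = arr.take m ++ [arr[m]] by
          rw [List.take_add_one, List.getElem?_eq_getElem hmlt]; rfl,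
        sorted_concat, ← hS, insertBy_eq_split]
      simp

-- ===== VERDICT (by name: the statement is the Claim_ definition above) =====
theorem ins_sort_2_spec : Claim_equal_ins_sort_2 := by
  intro arr _ hpre
  unfold Spec_ins_sort_2 ins_sort_2 ins_sort_2_alt
  have hn : 1 ≤ arr.length := List.length_pos_of_ne_nil hpre
  rw [outer_inv arr arr.length hn le_rfl]
  have hBlen : ((PySem.List.enumerate arr).map (fun p =>
      (1 : Int) + ((PySem.List.slice arr none (some p.1)).countP (fun x => decide (x ≤ p.2)) : Nat))).length
      = arr.length := by
    simp [PySem.List.length_enumerate]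
  simp [List.take_of_length_le (le_of_eq hBlen), List.take_length, List.drop_length]
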